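-- pv_equiv track=rewrite | github.com/meekotan12/Aura | Backend/app/services/notification_center_service.py | _summarize_statuses
-- ===== SOURCE A (Python) =====
-- from typing import Iterable
--
-- def _summarize_statuses(statuses: Iterable[str]) -> tuple[int, int, int]:
--     sent = 0
--     failed = 0
--     skipped = 0
--     for item in statuses:
--         if item == "sent":
--             sent += 1
--         elif item == "failed":
--             failed += 1
--         else:
--             skipped += 1
--     return sent, failed, skipped
-- ===== SOURCE B (Python) =====
-- from typing import Iterable
--
-- def _summarize_statuses(statuses: Iterable[str]) -> tuple[int, int, int]:
--     xs = list(statuses)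
--     sent = xs.count("sent")
--     failed = xs.count("failed")
--     return sent, failed, len(xs) - sent - failed
-- ===== Notes on version B (the rewrite author's own statement) =====
-- stated objective: simpler
-- what changed: B replaces A's single pass with a per-element three-way branch and three accumulators by branch-free staged passes: list.count for sent and failed, with skipped recovered arithmetically as len - sent - failed.
import Mathlib
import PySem

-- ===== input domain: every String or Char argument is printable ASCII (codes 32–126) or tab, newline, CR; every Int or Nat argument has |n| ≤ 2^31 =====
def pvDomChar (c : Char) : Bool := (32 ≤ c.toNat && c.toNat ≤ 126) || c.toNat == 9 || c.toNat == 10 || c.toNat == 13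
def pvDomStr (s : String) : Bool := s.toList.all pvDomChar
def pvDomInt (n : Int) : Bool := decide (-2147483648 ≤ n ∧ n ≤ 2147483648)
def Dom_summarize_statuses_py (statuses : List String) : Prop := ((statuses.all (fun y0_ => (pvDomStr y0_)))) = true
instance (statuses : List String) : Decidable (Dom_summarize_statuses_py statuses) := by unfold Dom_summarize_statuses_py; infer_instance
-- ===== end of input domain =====

-- B (staged counting passes + arithmetic for skipped) proved equal to A (single pass, per-item three-way branch); objective: simpler.
-- ===== PORT A =====
def summarize_statuses_py (statuses : List String) : Int × Int × Int :=
  let st := statuses.foldl (fun (acc : Int × Int × Int) item =>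
    if item == "sent" then (acc.1 + 1, acc.2.1, acc.2.2)
    else if item == "failed" then (acc.1, acc.2.1 + 1, acc.2.2)
    else (acc.1, acc.2.1, acc.2.2 + 1)) (0, 0, 0)
  st

-- ===== PORT B =====
def summarize_statuses_py_alt (statuses : List String) : Int × Int × Int :=
  let xs := statuses
  let sent : Int := PySem.List.count xs "sent"
  let failed : Int := PySem.List.count xs "failed"
  (sent, failed, (xs.length : Int) - sent - failed)

-- ===== PRECONDITION & SPEC =====
def Spec_summarize_statuses_py (statuses : List String) (out : Int × Int × Int) : Prop := out = summarize_statuses_py_alt statuses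
instance (statuses : List String) (out : Int × Int × Int) : Decidable (Spec_summarize_statuses_py statuses out) := by unfold Spec_summarize_statuses_py; infer_instance

-- ===== CLAIM (what is proved, stated in full; the proofs are below) =====
def Claim_equal_summarize_statuses_py : Prop := ∀ (statuses : List String), Dom_summarize_statuses_py statuses → Spec_summarize_statuses_py statuses (summarize_statuses_py statuses)

-- ===== LEMMAS AND PROOFS =====
theorem pv_foldA (l : List String) (a b c : Int) :
    l.foldl (fun (acc : Int × Int × Int) item =>
      if item == "sent" then (acc.1 + 1, acc.2.1, acc.2.2)
      else if item == "failed" then (acc.1, acc.2.1 + 1, acc.2.2)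
      else (acc.1, acc.2.1, acc.2.2 + 1)) (a, b, c)
    = (a + l.count "sent", b + l.count "failed",
       c + l.countP (fun x => !(x == "sent") && !(x == "failed"))) := by
  induction l generalizing a b c with
  | nil => simp
  | cons x xs ih =>
    rw [List.foldl_cons]
    by_cases hs : x = "sent"
    · rw [if_pos (by simp [hs]), ih]
      subst hs
      simp [List.count_cons, List.countP_cons, Prod.mk.injEq]
      push_cast
      omega
    · by_cases hf : x = "failed"
      · rw [if_neg (by simp [hs]), if_pos (by simp [hf]), ih]
        subst hf
        simp [List.count_cons, List.countP_cons, Prod.mk.injEq]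
        push_cast
        omega
      · rw [if_neg (by simp [hs]), if_neg (by simp [hf]), ih]
        simp [List.count_cons, List.countP_cons, Prod.mk.injEq, hs, hf]
        push_cast
        omega

theorem pv_counts_len (l : List String) :
    l.count "sent" + l.count "failed"
      + l.countP (fun x => !(x == "sent") && !(x == "failed")) = l.length := by
  induction l with
  | nil => simp
  | cons x xs ih =>
    by_cases hs : x = "sent"
    · subst hs; simp [List.count_cons, List.countP_cons]; omega
    · by_cases hf : x = "failed"
      · subst hf; simp [List.count_cons, List.countP_cons]; omega
      · simp [List.count_cons, hs, hf]; omega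

-- ===== VERDICT (by name: the statement is the Claim_ definition above) =====
theorem summarize_statuses_py_spec : Claim_equal_summarize_statuses_py := by
  intro statuses _
  show _ = _
  simp only [summarize_statuses_py, summarize_statuses_py_alt, PySem.List.count_eq]
  rw [pv_foldA]
  have h := pv_counts_len statuses
  simp only [Prod.mk.injEq]
  refine ⟨by simp, by simp, ?_⟩
  push_cast
  omega
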